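-- pv_equiv track=rewrite | github.com/d28khalil/Bidnology | retry_enrichment.py | fix_common_typos
-- ===== SOURCE A (Python) =====
-- def fix_common_typos(address: str) -> str:
--     """Fix common spelling errors in addresses."""
--     if not address:
--         return address
--
--     # Common typos
--     typos = {
--         'Mountian': 'Mountain',
--         'Moutain': 'Mountain',
--         'Moutnain': 'Mountain',
--         'Twp': 'Township',
--     }
--
--     for typo, correction in typos.items():
--         address = address.replace(typo, correction)
--
--     return address
-- ===== SOURCE B (Python) =====
-- def fix_common_typos(address: str) -> str:
--     """Fix common spelling errors in addresses."""
--     if not address: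
--         return address
--
--     corrections = (
--         ('Mountian', 'Mountain'),
--         ('Moutain', 'Mountain'),
--         ('Moutnain', 'Mountain'),
--         ('Twp', 'Township'),
--     )
--
--     out = []
--     i = 0
--     n = len(address)
--     while i < n:
--         for typo, fix in corrections:
--             if address.startswith(typo, i):
--                 out.append(fix)
--                 i += len(typo)
--                 break
--         else:
--             out.append(address[i])
--             i += 1
--     return ''.join(out)
-- ===== Notes on version B (the rewrite author's own statement) =====
-- stated objective: alternative
-- what changed: Replaces A's four sequential full-string replace passes (one per typo) by a single left-to-right scan that at each position tries the typo table in order, emitting the correction or copying one character.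
import Mathlib
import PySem

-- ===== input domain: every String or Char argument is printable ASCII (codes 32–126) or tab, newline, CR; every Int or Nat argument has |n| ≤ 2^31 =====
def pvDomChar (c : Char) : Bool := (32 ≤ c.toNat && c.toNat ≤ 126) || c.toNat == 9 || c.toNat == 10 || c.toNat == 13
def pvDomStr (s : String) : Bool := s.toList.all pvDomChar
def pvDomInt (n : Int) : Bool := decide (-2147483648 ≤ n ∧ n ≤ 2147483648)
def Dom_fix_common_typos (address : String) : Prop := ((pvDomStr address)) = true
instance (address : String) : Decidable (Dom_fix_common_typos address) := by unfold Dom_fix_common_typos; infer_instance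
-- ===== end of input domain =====

-- B replaces A's four sequential full-string replace passes by a single left-to-right scan
-- dispatching on the typo table (objective: alternative; same return value, no speed claim).

-- ===== PORT A =====
-- Transliteration of A: empty-string guard, then one str.replace pass per typo, in dict order.
def fix_common_typos (address : String) : String :=
  if address == "" then address
  else
    let a1 := PySem.Str.replace address "Mountian" "Mountain"
    let a2 := PySem.Str.replace a1 "Moutain" "Mountain"
    let a3 := PySem.Str.replace a2 "Moutnain" "Mountain"
    PySem.Str.replace a3 "Twp" "Township"

-- ===== PORT B =====
-- B's single while-loop scan: at each position try the corrections in table order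
-- (address.startswith(typo, i)); on a match emit the fix and skip the typo, else copy one char.
def scanFix (l : List Char) : List Char :=
  match l with
  | [] => []
  | c :: t =>
    if "Mountian".toList.isPrefixOf (c :: t) then
      "Mountain".toList ++ scanFix ((c :: t).drop 8)
    else if "Moutain".toList.isPrefixOf (c :: t) then
      "Mountain".toList ++ scanFix ((c :: t).drop 7)
    else if "Moutnain".toList.isPrefixOf (c :: t) then
      "Mountain".toList ++ scanFix ((c :: t).drop 8)
    else if "Twp".toList.isPrefixOf (c :: t) then
      "Township".toList ++ scanFix ((c :: t).drop 3)
    else c :: scanFix t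
termination_by l.length
decreasing_by
  all_goals (simp [List.length_drop]; try omega)

def fix_common_typos_alt (address : String) : String :=
  if address == "" then address
  else String.ofList (scanFix address.toList)

-- ===== PRECONDITION & SPEC =====
def Spec_fix_common_typos (address : String) (out : String) : Prop := out = fix_common_typos_alt address
instance (address : String) (out : String) : Decidable (Spec_fix_common_typos address out) := by unfold Spec_fix_common_typos; infer_instance

-- ===== CLAIM (what is proved, stated in full; the proofs are below) =====
def Claim_equal_fix_common_typos : Prop := ∀ (address : String), Dom_fix_common_typos address → Spec_fix_common_typos address (fix_common_typos address)

-- ===== LEMMAS AND PROOFS =====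

set_option maxRecDepth 4096

-- A clean, fuel-free characterisation of PySem.Chars.replace (leftmost-match scan).
def rep (old new : List Char) : List Char → List Char
  | [] => []
  | c :: t =>
    if old.isPrefixOf (c :: t) = true ∧ old ≠ [] then
      new ++ rep old new ((c :: t).drop old.length)
    else
      c :: rep old new t
termination_by l => l.length
decreasing_by
  · simp [List.length_drop]
    rename_i h
    have : 1 ≤ old.length := by
      cases old with | nil => exact absurd rfl h.2 | cons a b => simp
    omega
  · simp

theorem go_eq_rep (old new : List Char) (hne : old ≠ []) :
    ∀ (fuel : Nat) (l acc : List Char), l.length ≤ fuel →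
      PySem.Chars.replace.go old new fuel l acc = acc.reverse ++ rep old new l := by
  intro fuel
  induction fuel with
  | zero =>
    intro l acc h
    have : l = [] := List.eq_nil_of_length_eq_zero (Nat.le_zero.mp h)
    subst this
    simp [PySem.Chars.replace.go.eq_def, rep]
  | succ fuel ih =>
    intro l acc h
    have hone : 1 ≤ old.length := by
      cases old with | nil => exact absurd rfl hne | cons a b => simp
    match l with
    | [] => simp [PySem.Chars.replace.go.eq_def, rep]
    | c :: t =>
      rw [PySem.Chars.replace.go.eq_def, rep]
      by_cases hp : old.isPrefixOf (c :: t) = true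
      · simp only [hp, if_true, true_and]
        rw [ih ((c :: t).drop old.length) (new.reverse ++ acc)
              (by simp at h ⊢; omega)]
        simp [hne]
      · simp only [hp]
        rw [ih t (c :: acc) (by simp at h; omega)]
        simp

theorem replace_eq_rep (old new l : List Char) (hne : old ≠ []) :
    PySem.Chars.replace l old new = rep old new l := by
  rw [PySem.Chars.replace]
  have : old.isEmpty = false := by
    cases old with | nil => exact absurd rfl hne | cons a b => simp
  rw [this]
  simp only [Bool.false_eq_true, if_false]
  rw [go_eq_rep old new hne l.length l [] (le_refl _)]
  simp

theorem rep_match (old new : List Char) (c : Char) (t : List Char)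
    (hne : old ≠ []) (h : old.isPrefixOf (c :: t) = true) :
    rep old new (c :: t) = new ++ rep old new ((c :: t).drop old.length) := by
  rw [rep]; simp [h, hne]

theorem rep_nomatch (old new : List Char) (c : Char) (t : List Char)
    (h : old.isPrefixOf (c :: t) = false) :
    rep old new (c :: t) = c :: rep old new t := by
  rw [rep]; simp [h]

-- A replacement whose output starts with 'M' or 'T' cannot create a prefix made of
-- characters other than 'M'/'T': such a prefix of (rep old new t) was already a prefix of t.
theorem rep_prefix_reflect (old new : List Char)
    (hnew : new.head? = some 'M' ∨ new.head? = some 'T') (t : List Char) :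
    ∀ (s : List Char), (∀ ch ∈ s, ch ≠ 'M' ∧ ch ≠ 'T') →
      s <+: rep old new t → s <+: t := by
  induction t using rep.induct old with
  | case1 =>
    intro s _ hs
    simpa [rep] using hs
  | case2 c t hcond ih =>
    intro s havoid hs
    rw [rep, if_pos hcond] at hs
    match s with
    | [] => exact List.nil_prefix
    | e :: s' =>
      obtain ⟨h0, ntl, hnew0⟩ : ∃ h0 ntl, new = h0 :: ntl := by
        rcases hnew with h | h <;>
          · cases new with
            | nil => simp at h
            | cons a b => exact ⟨a, b, rfl⟩
      rw [hnew0, List.cons_append, List.cons_prefix_cons] at hs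
      have he : e = h0 := hs.1
      have : h0 = 'M' ∨ h0 = 'T' := by
        rcases hnew with h | h <;> rw [hnew0] at h <;> simp at h <;> [left; right] <;> exact h
      have hmem := havoid e (List.mem_cons_self ..)
      rcases this with h | h <;> rw [← h, ← he] at hmem <;> simp at hmem
  | case3 c t hcond ih =>
    intro s havoid hs
    rw [rep, if_neg hcond] at hs
    match s with
    | [] => exact List.nil_prefix
    | e :: s' =>
      rw [List.cons_prefix_cons] at hs
      rw [List.cons_prefix_cons]
      exact ⟨hs.1, ih s' (fun ch hch => havoid ch (List.mem_cons_of_mem _ hch)) hs.2⟩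

-- Abbreviations for the four passes (key/fix pairs of A, in dict order).
def rep1 (l : List Char) : List Char := rep "Mountian".toList "Mountain".toList l
def rep2 (l : List Char) : List Char := rep "Moutain".toList "Mountain".toList l
def rep3 (l : List Char) : List Char := rep "Moutnain".toList "Mountain".toList l
def rep4 (l : List Char) : List Char := rep "Twp".toList "Township".toList l

-- Push lemmas: no key matches at any position strictly inside these literal blocks,
-- so each pass carries the block through unchanged.
theorem pushM_2 (X : List Char) : rep2 ("Mountain".toList ++ X) = "Mountain".toList ++ rep2 X := by
  simp [rep2, rep, List.isPrefixOf]

theorem pushM_3 (X : List Char) : rep3 ("Mountain".toList ++ X) = "Mountain".toList ++ rep3 X := by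
  simp [rep3, rep, List.isPrefixOf]

theorem pushM_4 (X : List Char) : rep4 ("Mountain".toList ++ X) = "Mountain".toList ++ rep4 X := by
  simp [rep4, rep, List.isPrefixOf]

theorem push2_1 (X : List Char) : rep1 ("Moutain".toList ++ X) = "Moutain".toList ++ rep1 X := by
  simp [rep1, rep, List.isPrefixOf]

theorem push3_1 (X : List Char) : rep1 ("Moutnain".toList ++ X) = "Moutnain".toList ++ rep1 X := by
  simp [rep1, rep, List.isPrefixOf]

theorem push3_2 (X : List Char) : rep2 ("Moutnain".toList ++ X) = "Moutnain".toList ++ rep2 X := by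
  simp [rep2, rep, List.isPrefixOf]

theorem push4_1 (X : List Char) : rep1 ("Twp".toList ++ X) = "Twp".toList ++ rep1 X := by
  simp [rep1, rep, List.isPrefixOf]

theorem push4_2 (X : List Char) : rep2 ("Twp".toList ++ X) = "Twp".toList ++ rep2 X := by
  simp [rep2, rep, List.isPrefixOf]

theorem push4_3 (X : List Char) : rep3 ("Twp".toList ++ X) = "Twp".toList ++ rep3 X := by
  simp [rep3, rep, List.isPrefixOf]

theorem bool_ne_true (b : Bool) (h : ¬ b = true) : b = false := by
  cases b
  · rfl
  · exact absurd rfl h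

theorem chain_eq_scan (l : List Char) : rep4 (rep3 (rep2 (rep1 l))) = scanFix l := by
  induction l using scanFix.induct with
  | case1 => simp [rep1, rep2, rep3, rep4, rep, scanFix]
  | case2 c t hp1 ih =>
    obtain ⟨u, hu⟩ : "Mountian".toList <+: (c :: t) := List.isPrefixOf_iff_prefix.mp hp1
    have hdrop : (c :: t).drop 8 = u := by rw [← hu]; simp
    rw [rep1, rep_match _ _ c t (by simp) hp1]
    have : ("Mountian".toList).length = 8 := by decide
    rw [this, hdrop]
    rw [show rep "Mountian".toList "Mountain".toList u = rep1 u from rfl]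
    rw [hdrop] at ih
    rw [pushM_2, pushM_3, pushM_4, ih]
    rw [scanFix, if_pos hp1, hdrop]
  | case3 c t hp1 hp2 ih =>
    obtain ⟨u, hu⟩ : "Moutain".toList <+: (c :: t) := List.isPrefixOf_iff_prefix.mp hp2
    have hdrop : (c :: t).drop 7 = u := by rw [← hu]; simp
    have hL : rep4 (rep3 (rep2 (rep1 (c :: t))))
        = "Mountain".toList ++ rep4 (rep3 (rep2 (rep1 u))) := by
      rw [← hu, push2_1]
      rw [show rep2 ("Moutain".toList ++ rep1 u)
            = "Mountain".toList ++ rep2 (rep1 u) from by simp [rep2, rep, List.isPrefixOf]]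
      rw [pushM_3, pushM_4]
    rw [hdrop] at ih
    rw [hL, ih, scanFix, if_neg hp1, if_pos hp2, hdrop]
  | case4 c t hp1 hp2 hp3 ih =>
    obtain ⟨u, hu⟩ : "Moutnain".toList <+: (c :: t) := List.isPrefixOf_iff_prefix.mp hp3
    have hdrop : (c :: t).drop 8 = u := by rw [← hu]; simp
    have hL : rep4 (rep3 (rep2 (rep1 (c :: t))))
        = "Mountain".toList ++ rep4 (rep3 (rep2 (rep1 u))) := by
      rw [← hu, push3_1, push3_2]
      rw [show rep3 ("Moutnain".toList ++ rep2 (rep1 u))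
            = "Mountain".toList ++ rep3 (rep2 (rep1 u)) from by simp [rep3, rep, List.isPrefixOf]]
      rw [pushM_4]
    rw [hdrop] at ih
    rw [hL, ih, scanFix, if_neg hp1, if_neg hp2, if_pos hp3, hdrop]
  | case5 c t hp1 hp2 hp3 hp4 ih =>
    obtain ⟨u, hu⟩ : "Twp".toList <+: (c :: t) := List.isPrefixOf_iff_prefix.mp hp4
    have hdrop : (c :: t).drop 3 = u := by rw [← hu]; simp
    have hL : rep4 (rep3 (rep2 (rep1 (c :: t))))
        = "Township".toList ++ rep4 (rep3 (rep2 (rep1 u))) := by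
      rw [← hu, push4_1, push4_2, push4_3]
      rw [show rep4 ("Twp".toList ++ rep3 (rep2 (rep1 u)))
            = "Township".toList ++ rep4 (rep3 (rep2 (rep1 u))) from by simp [rep4, rep, List.isPrefixOf]]
    rw [hdrop] at ih
    rw [hL, ih, scanFix, if_neg hp1, if_neg hp2, if_neg hp3,
        if_pos hp4, hdrop]
  | case6 c t hp1 hp2 hp3 hp4 ih =>
    have e1 : rep1 (c :: t) = c :: rep1 t :=
      rep_nomatch _ _ _ _ (bool_ne_true _ hp1)
    have n2 : "Moutain".toList.isPrefixOf (c :: rep1 t) = false := by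
      apply bool_ne_true
      intro h
      have hpre := List.isPrefixOf_iff_prefix.mp h
      rw [show "Moutain".toList = 'M' :: ['o','u','t','a','i','n'] from rfl,
          List.cons_prefix_cons] at hpre
      have hrefl := rep_prefix_reflect "Mountian".toList "Mountain".toList (by left; rfl) t
        ['o','u','t','a','i','n'] (by simp) hpre.2
      exact hp2 (List.isPrefixOf_iff_prefix.mpr (by
        rw [show "Moutain".toList = 'M' :: ['o','u','t','a','i','n'] from rfl,
            List.cons_prefix_cons]
        exact ⟨hpre.1, hrefl⟩))
    have e2 : rep2 (c :: rep1 t) = c :: rep2 (rep1 t) := rep_nomatch _ _ _ _ n2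
    have n3 : "Moutnain".toList.isPrefixOf (c :: rep2 (rep1 t)) = false := by
      apply bool_ne_true
      intro h
      have hpre := List.isPrefixOf_iff_prefix.mp h
      rw [show "Moutnain".toList = 'M' :: ['o','u','t','n','a','i','n'] from rfl,
          List.cons_prefix_cons] at hpre
      have h2 := rep_prefix_reflect "Moutain".toList "Mountain".toList (by left; rfl) (rep1 t)
        ['o','u','t','n','a','i','n'] (by simp) hpre.2
      have h1 := rep_prefix_reflect "Mountian".toList "Mountain".toList (by left; rfl) t
        ['o','u','t','n','a','i','n'] (by simp) h2
      exact hp3 (List.isPrefixOf_iff_prefix.mpr (by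
        rw [show "Moutnain".toList = 'M' :: ['o','u','t','n','a','i','n'] from rfl,
            List.cons_prefix_cons]
        exact ⟨hpre.1, h1⟩))
    have e3 : rep3 (c :: rep2 (rep1 t)) = c :: rep3 (rep2 (rep1 t)) := rep_nomatch _ _ _ _ n3
    have n4 : "Twp".toList.isPrefixOf (c :: rep3 (rep2 (rep1 t))) = false := by
      apply bool_ne_true
      intro h
      have hpre := List.isPrefixOf_iff_prefix.mp h
      rw [show "Twp".toList = 'T' :: ['w','p'] from rfl, List.cons_prefix_cons] at hpre
      have h3 := rep_prefix_reflect "Moutnain".toList "Mountain".toList (by left; rfl)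
        (rep2 (rep1 t)) ['w','p'] (by simp) hpre.2
      have h2 := rep_prefix_reflect "Moutain".toList "Mountain".toList (by left; rfl) (rep1 t)
        ['w','p'] (by simp) h3
      have h1 := rep_prefix_reflect "Mountian".toList "Mountain".toList (by left; rfl) t
        ['w','p'] (by simp) h2
      exact hp4 (List.isPrefixOf_iff_prefix.mpr (by
        rw [show "Twp".toList = 'T' :: ['w','p'] from rfl, List.cons_prefix_cons]
        exact ⟨hpre.1, h1⟩))
    have e4 : rep4 (c :: rep3 (rep2 (rep1 t))) = c :: rep4 (rep3 (rep2 (rep1 t))) :=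
      rep_nomatch _ _ _ _ n4
    rw [scanFix, if_neg hp1, if_neg hp2, if_neg hp3, if_neg hp4]
    rw [show rep1 (c :: t) = c :: rep1 t from e1, e2, e3, e4, ih]

-- ===== VERDICT (by name: the statement is the Claim_ definition above) =====
theorem fix_common_typos_spec : Claim_equal_fix_common_typos := by
  intro address _
  unfold Spec_fix_common_typos fix_common_typos fix_common_typos_alt
  by_cases h : address == ""
  · simp [h]
  · simp only [h, Bool.false_eq_true, if_false]
    have key : (PySem.Str.replace (PySem.Str.replace (PySem.Str.replace
        (PySem.Str.replace address "Mountian" "Mountain") "Moutain" "Mountain")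
        "Moutnain" "Mountain") "Twp" "Township").toList = scanFix address.toList := by
      simp only [PySem.Str.toList_replace]
      rw [replace_eq_rep _ _ _ (by simp), replace_eq_rep _ _ _ (by simp),
          replace_eq_rep _ _ _ (by simp), replace_eq_rep _ _ _ (by simp)]
      exact chain_eq_scan address.toList
    have h2 := congrArg String.ofList key
    rw [String.ofList_toList] at h2
    exact h2
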